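-- pv_equiv track=rewrite | github.com/98-jeonghoon/AlgorithmStudy | 240810/고대 보물 지도의 비밀/secret-of-ancient-treasure-map.py | max_sum_with_limited_negatives
-- ===== SOURCE A (Python) =====
-- def max_sum_with_limited_negatives(n, k, numbers):
--     left = 0
--     current_sum = 0
--     max_sum = 0
--     negative_count = 0
--
--     for right in range(n):
--         current_sum += numbers[right]
--
--         if numbers[right] < 0:
--             negative_count += 1
--
--         while negative_count > k:
--             if numbers[left] < 0:
--                 negative_count -= 1
--             current_sum -= numbers[left]
--             left += 1
--
--         max_sum = max(max_sum, current_sum)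
--
--     return max_sum
-- ===== SOURCE B (Python) =====
-- def max_sum_with_limited_negatives(n, k, numbers):
--     prefix = [0]
--     neg_pos = []
--     for i in range(n):
--         prefix.append(prefix[-1] + numbers[i])
--         if numbers[i] < 0:
--             neg_pos.append(i)
--     best = 0
--     t = 0
--     for right in range(n):
--         if numbers[right] < 0:
--             t += 1
--         left = 0 if t <= k else neg_pos[t - k - 1] + 1
--         cand = prefix[right + 1] - prefix[left]
--         if cand > best:
--             best = cand
--     return best
-- ===== Notes on version B (the rewrite author's own statement) =====
-- stated objective: alternative
-- what changed: replaces the two-pointer sliding window (running sum and inner while-loop that pops elements from the left) by precomputed prefix sums and a list of negative positions, so each window's left bound and sum come from direct index arithmetic with no inner loop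
-- outside the precondition, e.g. on max_sum_with_limited_negatives(2, -1, [-2, 1, -2]): A returns 2, B raises IndexError
import Mathlib
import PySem

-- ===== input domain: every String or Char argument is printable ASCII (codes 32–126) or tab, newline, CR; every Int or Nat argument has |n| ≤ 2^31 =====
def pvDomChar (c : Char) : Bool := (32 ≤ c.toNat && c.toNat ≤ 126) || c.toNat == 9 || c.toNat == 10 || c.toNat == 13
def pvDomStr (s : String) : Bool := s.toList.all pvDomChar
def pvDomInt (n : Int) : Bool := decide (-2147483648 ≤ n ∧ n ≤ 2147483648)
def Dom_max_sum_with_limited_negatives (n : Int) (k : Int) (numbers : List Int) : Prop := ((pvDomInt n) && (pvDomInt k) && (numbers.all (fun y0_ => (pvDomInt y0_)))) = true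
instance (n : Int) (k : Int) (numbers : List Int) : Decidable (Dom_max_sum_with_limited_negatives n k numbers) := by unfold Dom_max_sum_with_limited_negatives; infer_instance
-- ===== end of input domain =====

-- B replaces A's two-pointer sliding window by prefix sums plus a list of negative
-- positions (same result, no inner while loop); equivalence on Pre_ is proved below.

-- ===== PORT A =====
-- inner 'while negative_count > k' loop of A; on an out-of-range numbers[left]
-- (IndexError in Python, excluded by Pre_) it stops and returns the current state.
def pvInnerA (nums : List Int) (k : Int) (left : Nat) (cs : Int) (nc : Int) : Nat × Int × Int :=
  if nc > k then
    if h : left < nums.length then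
      pvInnerA nums k (left + 1) (cs - nums[left])
        (if nums[left] < 0 then nc - 1 else nc)
    else (left, cs, nc)
  else (left, cs, nc)
termination_by nums.length - left
decreasing_by omega

-- one iteration of A's 'for right in range(n)' loop; state = (left, current_sum, max_sum, negative_count)
def pvStepA (nums : List Int) (k : Int) (st : Nat × Int × Int × Int) (r : Int) : Nat × Int × Int × Int :=
  match PySem.List.pyGet? nums r with
  | none => st
  | some v =>
    let cs := st.2.1 + v
    let nc := if v < 0 then st.2.2.2 + 1 else st.2.2.2
    let w := pvInnerA nums k st.1 cs nc
    (w.1, w.2.1, max st.2.2.1 w.2.1, w.2.2)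

def max_sum_with_limited_negatives (n : Int) (k : Int) (numbers : List Int) : Int :=
  ((PySem.List.pyRange 0 n 1).foldl (pvStepA numbers k) (0, 0, 0, 0)).2.2.1

-- ===== PORT B =====
-- first pass of Source B: builds (prefix, neg_pos)
def pvAltPass1 (nums : List Int) (st : List Int × List Int) (i : Int) : List Int × List Int :=
  match PySem.List.pyGet? nums i with
  | none => st
  | some v =>
    (st.1 ++ [PySem.List.pyGetD st.1 (-1) 0 + v], if v < 0 then st.2 ++ [i] else st.2)

-- second pass of Source B: state = (best, t)
def pvAltPass2 (nums : List Int) (k : Int) (P : List Int) (neg : List Int)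
    (st : Int × Int) (r : Int) : Int × Int :=
  match PySem.List.pyGet? nums r with
  | none => st
  | some v =>
    let t := if v < 0 then st.2 + 1 else st.2
    let left := if t ≤ k then 0 else PySem.List.pyGetD neg (t - k - 1) 0 + 1
    let cand := PySem.List.pyGetD P (r + 1) 0 - PySem.List.pyGetD P left 0
    (if cand > st.1 then cand else st.1, t)

def max_sum_with_limited_negatives_alt (n : Int) (k : Int) (numbers : List Int) : Int :=
  let pn := (PySem.List.pyRange 0 n 1).foldl (pvAltPass1 numbers) ([0], [])
  ((PySem.List.pyRange 0 n 1).foldl (pvAltPass2 numbers k pn.1 pn.2) (0, 0)).1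

-- ===== PRECONDITION & SPEC =====
-- Pre_ excludes n > len(numbers), where A raises IndexError, and a negative k with
-- 0 < n, where A's while-loop pops elements beyond the current window — usually
-- raising IndexError, otherwise returning an accidental value — while B always
-- raises IndexError there (neg_pos[t - k - 1] is past the end of neg_pos).
def Pre_max_sum_with_limited_negatives (n : Int) (k : Int) (numbers : List Int) : Prop :=
  n ≤ (numbers.length : Int) ∧ (n ≤ 0 ∨ 0 ≤ k)
instance (n : Int) (k : Int) (numbers : List Int) : Decidable (Pre_max_sum_with_limited_negatives n k numbers) := by unfold Pre_max_sum_with_limited_negatives; infer_instance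

def pvWitness_max_sum_with_limited_negatives : Int × Int × List Int := (4, 1, [2, -1, 3, -2])

def Spec_max_sum_with_limited_negatives (n : Int) (k : Int) (numbers : List Int) (out : Int) : Prop := out = max_sum_with_limited_negatives_alt n k numbers
instance (n : Int) (k : Int) (numbers : List Int) (out : Int) : Decidable (Spec_max_sum_with_limited_negatives n k numbers out) := by unfold Spec_max_sum_with_limited_negatives; infer_instance

-- ===== CLAIM (what is proved, stated in full; the proofs are below) =====
def Claim_equal_max_sum_with_limited_negatives : Prop := ∀ (n : Int) (k : Int) (numbers : List Int), Dom_max_sum_with_limited_negatives n k numbers → Pre_max_sum_with_limited_negatives n k numbers → Spec_max_sum_with_limited_negatives n k numbers (max_sum_with_limited_negatives n k numbers)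

-- ===== LEMMAS AND PROOFS =====

-- prefix sum of the first i elements
def pvPref (nums : List Int) (i : Nat) : Int := (nums.take i).sum
-- indices j < r with nums[j] < 0, in order
def pvNegIdx (nums : List Int) (r : Nat) : List Nat :=
  (List.range r).filter (fun j => decide (nums.getD j 0 < 0))
-- number of negatives among the first r elements
def pvT (nums : List Int) (r : Nat) : Nat := (pvNegIdx nums r).length
-- the left bound A's window has after processing index r-1 (t computed over first r elements)
def pvL (nums : List Int) (K : Nat) (r : Nat) : Nat :=
  if pvT nums r ≤ K then 0 else (pvNegIdx nums r).getD (pvT nums r - K - 1) 0 + 1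
-- the common running maximum both programs compute
def pvBest (nums : List Int) (K : Nat) (r : Nat) : Int :=
  (List.range r).foldl
    (fun b j => max b (pvPref nums (j + 1) - pvPref nums (pvL nums K (j + 1)))) 0

lemma pvPref_succ (nums : List Int) (i : Nat) (hi : i < nums.length) :
    pvPref nums (i + 1) = pvPref nums i + nums[i] := by
  unfold pvPref
  rw [List.sum_take_succ _ _ hi]

lemma pvNegIdx_succ (nums : List Int) (r : Nat) :
    pvNegIdx nums (r + 1)
      = pvNegIdx nums r ++ (if nums.getD r 0 < 0 then [r] else []) := by
  simp [pvNegIdx, List.range_succ, List.filter_append]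
  split_ifs <;> simp_all

lemma pvT_succ (nums : List Int) (r : Nat) :
    pvT nums (r + 1) = pvT nums r + (if nums.getD r 0 < 0 then 1 else 0) := by
  simp [pvT, pvNegIdx_succ]
  split_ifs <;> simp

lemma pvT_mono (nums : List Int) {a b : Nat} (h : a ≤ b) :
    pvT nums a ≤ pvT nums b := by
  induction b with
  | zero =>
    have ha : a = 0 := Nat.le_zero.mp h
    subst ha; exact le_refl _
  | succ b ih =>
    rcases Nat.lt_or_ge a (b+1) with h' | h'
    · have := ih (by omega)
      rw [pvT_succ]; omega
    · have : a = b + 1 := by omega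
      subst this; exact le_refl _

lemma pvNegIdx_getD_spec (nums : List Int) (r i : Nat) (hi : i < pvT nums r) :
    (pvNegIdx nums r).getD i 0 < r ∧
    nums.getD ((pvNegIdx nums r).getD i 0) 0 < 0 ∧
    pvT nums ((pvNegIdx nums r).getD i 0) = i ∧
    pvT nums ((pvNegIdx nums r).getD i 0 + 1) = i + 1 := by
  induction r with
  | zero => simp [pvT, pvNegIdx] at hi
  | succ r ih =>
    rw [pvT_succ] at hi
    rw [pvNegIdx_succ]
    by_cases hneg : nums.getD r 0 < 0
    · simp only [hneg, if_pos] at hi ⊢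
      rcases Nat.lt_or_ge i (pvT nums r) with h' | h'
      · have hgd : (pvNegIdx nums r ++ [r]).getD i 0 = (pvNegIdx nums r).getD i 0 := by
          have : i < (pvNegIdx nums r).length := h'
          simp [List.getD, List.getElem?_append_left this]
        rw [hgd]
        have := ih h'
        exact ⟨by omega, this.2.1, this.2.2.1, this.2.2.2⟩
      · have hieq : i = pvT nums r := by omega
        have hgd : (pvNegIdx nums r ++ [r]).getD i 0 = r := by
          subst hieq
          simp [List.getD, pvT]
        rw [hgd]
        subst hieq
        exact ⟨by omega, hneg, rfl, by rw [pvT_succ, if_pos hneg]⟩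
    · simp only [hneg, if_false, Nat.add_zero, List.append_nil] at hi ⊢
      have := ih hi
      exact ⟨by omega, this.2.1, this.2.2.1, this.2.2.2⟩


lemma pvNegIdx_prefix_getD (nums : List Int) {r m i : Nat} (hrm : r ≤ m)
    (hi : i < pvT nums r) :
    (pvNegIdx nums m).getD i 0 = (pvNegIdx nums r).getD i 0 := by
  induction m with
  | zero =>
    have : r = 0 := by omega
    subst this; rfl
  | succ m ih =>
    rcases Nat.lt_or_ge r (m + 1) with h' | h'
    · have hrm' : r ≤ m := by omega
      rw [pvNegIdx_succ]
      have hlen : i < (pvNegIdx nums m).length := lt_of_lt_of_le hi (pvT_mono nums hrm')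
      rw [List.getD_append _ _ _ _ hlen]
      exact ih hrm'
    · have : r = m + 1 := by omega
      subst this; rfl

lemma pvL_le (nums : List Int) (K r : Nat) : pvL nums K r ≤ r := by
  unfold pvL
  split_ifs with h
  · omega
  · have hi : pvT nums r - K - 1 < pvT nums r := by omega
    have := pvNegIdx_getD_spec nums r _ hi
    omega

-- running A's inner while-loop from 'left' with count k+1: it stops one past j,
-- the first negative index ≥ left
lemma pvInnerA_run (nums : List Int) (K : Nat) (j : Nat) (hj : j < nums.length)
    (hnegj : nums[j] < 0) :
    ∀ d left cs, j - left = d → left ≤ j →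
      (∀ x, left ≤ x → x < j → ¬ nums.getD x 0 < 0) →
      pvInnerA nums (↑K) left cs ((↑K : Int) + 1)
        = (j + 1, cs - (pvPref nums (j + 1) - pvPref nums left), (↑K : Int)) := by
  intro d
  induction d with
  | zero =>
    intro left cs hd hle _
    have hlj : left = j := by omega
    subst hlj
    rw [pvInnerA, if_pos (by omega), dif_pos hj, if_pos hnegj]
    rw [pvInnerA, if_neg (by omega)]
    have h2 : cs - (pvPref nums (left + 1) - pvPref nums left) = cs - nums[left] := by
      rw [pvPref_succ _ _ hj]; ring
    rw [h2]
    simp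
  | succ d ih =>
    intro left cs hd hle hno
    have hlj : left < j := by omega
    have hlen : left < nums.length := by omega
    have hpos : ¬ nums[left] < 0 := by
      have := hno left (le_refl _) hlj
      rwa [List.getD_eq_getElem _ _ hlen] at this
    rw [pvInnerA, if_pos (by omega), dif_pos hlen, if_neg hpos]
    have := ih (left + 1) (cs - nums[left]) (by omega) (by omega)
      (fun x hx hx' => hno x (by omega) hx')
    rw [this]
    have h2 : cs - nums[left] - (pvPref nums (j + 1) - pvPref nums (left + 1))
        = cs - (pvPref nums (j + 1) - pvPref nums left) := by
      rw [pvPref_succ nums left hlen]; ring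
    rw [h2]

lemma pvBest_succ (nums : List Int) (K r : Nat) :
    pvBest nums K (r + 1)
      = max (pvBest nums K r)
          (pvPref nums (r + 1) - pvPref nums (pvL nums K (r + 1))) := by
  unfold pvBest
  rw [List.range_succ, List.foldl_append]
  rfl

-- the invariant of A's outer loop: left, current_sum, max_sum, negative_count
-- after processing the first m indices
lemma pvA_invariant (nums : List Int) (K : Nat) :
    ∀ m, m ≤ nums.length →
      (List.range m).foldl (fun st (j : Nat) => pvStepA nums (↑K) st (j : Int)) (0, 0, 0, 0)
        = (pvL nums K m, pvPref nums m - pvPref nums (pvL nums K m),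
           pvBest nums K m, (↑(min (pvT nums m) K) : Int)) := by
  intro m
  induction m with
  | zero =>
    intro _
    simp [pvL, pvT, pvNegIdx, pvPref, pvBest]
  | succ m ih =>
    intro hm
    have hmlen : m < nums.length := by omega
    rw [List.range_succ, List.foldl_append, List.foldl_cons, List.foldl_nil,
      ih (by omega)]
    have hget : PySem.List.pyGet? nums (↑m) = some nums[m] := by
      rw [PySem.List.pyGet?_natCast, List.getElem?_eq_getElem hmlen]
    have hgd : nums.getD m 0 = nums[m] := List.getD_eq_getElem _ _ hmlen
    unfold pvStepA
    rw [hget]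
    by_cases hneg : nums[m] < 0
    · -- a negative element enters the window
      have ht' : pvT nums (m + 1) = pvT nums m + 1 := by
        rw [pvT_succ, hgd, if_pos hneg]
      by_cases htK : pvT nums m < K
      · -- still at most K negatives: while-loop does not run, left stays 0
        have hL : pvL nums K m = 0 := by unfold pvL; rw [if_pos (by omega)]
        have hL' : pvL nums K (m + 1) = 0 := by unfold pvL; rw [if_pos (by omega)]
        have hmin : min (pvT nums m) K = pvT nums m := by omega
        have hmin' : min (pvT nums (m + 1)) K = pvT nums (m + 1) := by omega
        simp only [hmin, hL, if_pos hneg]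
        rw [pvInnerA, if_neg (by omega)]
        rw [pvBest_succ, hL', hmin', ht']
        have hcs : pvPref nums m - pvPref nums 0 + nums[m]
            = pvPref nums (m + 1) - pvPref nums 0 := by
          rw [pvPref_succ nums m hmlen]; ring
        rw [hcs]
        have : ((↑(pvT nums m) : Int) + 1) = ↑(pvT nums m + 1) := by push_cast; ring
        rw [this]
      · -- K+1 negatives: the while-loop pops up to and including the first negative
        have hK : min (pvT nums m) K = K := by omega
        have hi : pvT nums m - K < pvT nums (m + 1) := by omega
        obtain ⟨hjlt, hjneg, hjT, hjT'⟩ := pvNegIdx_getD_spec nums (m + 1) _ hi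
        set j := (pvNegIdx nums (m + 1)).getD (pvT nums m - K) 0 with hjdef
        have hjlen : j < nums.length := by omega
        have hTL : pvT nums (pvL nums K m) = pvT nums m - K := by
          unfold pvL
          split_ifs with h
          · have hTm : pvT nums m = K := by omega
            have h0 : pvT nums 0 = 0 := rfl
            omega
          · have hi0 : pvT nums m - K - 1 < pvT nums m := by omega
            have := pvNegIdx_getD_spec nums m _ hi0
            omega
        have hLj : pvL nums K m ≤ j := by
          by_contra hcon
          have h1 : j + 1 ≤ pvL nums K m := by omega
          have := pvT_mono nums h1
          omega
        have hno : ∀ x, pvL nums K m ≤ x → x < j → ¬ nums.getD x 0 < 0 := by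
          intro x hx hx' hnegx
          have h1 : pvT nums (x + 1) = pvT nums x + 1 := by
            rw [pvT_succ, if_pos hnegx]
          have h2 := pvT_mono nums hx
          have h3 := pvT_mono nums (show x + 1 ≤ j by omega)
          omega
        have hrun := pvInnerA_run nums K j hjlen (by
            rwa [List.getD_eq_getElem _ _ hjlen] at hjneg)
          (j - pvL nums K m) (pvL nums K m)
          (pvPref nums m - pvPref nums (pvL nums K m) + nums[m]) rfl hLj hno
        simp only [hK, if_pos hneg]
        rw [hrun]
        have hL' : pvL nums K (m + 1) = j + 1 := by
          unfold pvL
          rw [if_neg (by omega), ht']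
          have : pvT nums m + 1 - K - 1 = pvT nums m - K := by omega
          rw [this, ← hjdef]
        have hmin' : min (pvT nums (m + 1)) K = K := by omega
        rw [pvBest_succ, hL', hmin']
        have hcs2 : pvPref nums m - pvPref nums (pvL nums K m) + nums[m]
              - (pvPref nums (j + 1) - pvPref nums (pvL nums K m))
            = pvPref nums (m + 1) - pvPref nums (j + 1) := by
          rw [pvPref_succ nums m hmlen]; ring
        rw [hcs2]
    · -- nonnegative element: counts unchanged, while-loop does not run
      have ht' : pvT nums (m + 1) = pvT nums m := by
        rw [pvT_succ, hgd, if_neg hneg]; omega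
      have hIdx : pvNegIdx nums (m + 1) = pvNegIdx nums m := by
        rw [pvNegIdx_succ, hgd, if_neg hneg]; simp
      have hL' : pvL nums K (m + 1) = pvL nums K m := by
        unfold pvL; rw [ht', hIdx]
      simp only [if_neg hneg]
      rw [pvInnerA, if_neg (by
        have : min (pvT nums m) K ≤ K := by omega
        push_cast
        omega)]
      rw [pvBest_succ, hL', ht']
      have hcs : pvPref nums m - pvPref nums (pvL nums K m) + nums[m]
          = pvPref nums (m + 1) - pvPref nums (pvL nums K m) := by
        rw [pvPref_succ nums m hmlen]; ring
      rw [hcs]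

lemma pvGetD_map_intCast (l : List Nat) (i : Nat) (hi : i < l.length) :
    (l.map (fun j : Nat => (j : Int))).getD i 0 = ((l.getD i 0 : Nat) : Int) := by
  rw [List.getD_eq_getElem _ _ (by simpa using hi), List.getD_eq_getElem _ _ hi]
  simp

lemma pvGetD_map_range (f : Nat → Int) (n i : Nat) (hi : i < n) :
    ((List.range n).map f).getD i 0 = f i := by
  rw [List.getD_eq_getElem _ _ (by simpa using hi)]
  simp

-- B's first pass builds exactly the prefix sums and the list of negative positions
lemma pvB_pass1 (nums : List Int) :
    ∀ m, m ≤ nums.length →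
      (List.range m).foldl (fun st (i : Nat) => pvAltPass1 nums st (i : Int)) ([0], [])
        = ((List.range (m + 1)).map (pvPref nums),
           (pvNegIdx nums m).map (fun j : Nat => (j : Int))) := by
  intro m
  induction m with
  | zero =>
    intro _
    simp [pvPref, pvNegIdx]
  | succ m ih =>
    intro hm
    have hmlen : m < nums.length := by omega
    rw [List.range_succ, List.foldl_append, List.foldl_cons, List.foldl_nil,
      ih (by omega)]
    have hget : PySem.List.pyGet? nums (↑m) = some nums[m] := by
      rw [PySem.List.pyGet?_natCast, List.getElem?_eq_getElem hmlen]
    have hgd : nums.getD m 0 = nums[m] := List.getD_eq_getElem _ _ hmlen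
    unfold pvAltPass1
    rw [hget]
    have hsplit : (List.range (m + 1)).map (pvPref nums)
        = (List.range m).map (pvPref nums) ++ [pvPref nums m] := by
      rw [List.range_succ, List.map_append]; rfl
    have hlast : PySem.List.pyGetD ((List.range (m + 1)).map (pvPref nums)) (-1) 0
        = pvPref nums m := by
      rw [hsplit, PySem.List.pyGetD_neg_one_append_singleton]
    simp only [hlast, Prod.mk.injEq]
    constructor
    · rw [show List.range (m + 1 + 1) = List.range (m + 1) ++ [m + 1] from List.range_succ,
        List.map_append]
      simp [pvPref_succ nums m hmlen]
    · rw [pvNegIdx_succ, hgd, List.map_append]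
      by_cases hneg : nums[m] < 0 <;> simp [hneg]

-- B's second pass computes the same running maximum and negative count
lemma pvB_pass2 (nums : List Int) (K m : Nat) (hm : m ≤ nums.length) :
    ∀ r, r ≤ m →
      (List.range r).foldl
        (fun st (j : Nat) => pvAltPass2 nums (↑K)
          ((List.range (m + 1)).map (pvPref nums))
          ((pvNegIdx nums m).map (fun j : Nat => (j : Int))) st (j : Int)) (0, 0)
        = (pvBest nums K r, (↑(pvT nums r) : Int)) := by
  intro r
  induction r with
  | zero =>
    intro _
    simp [pvBest, pvT, pvNegIdx]
  | succ r ih =>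
    intro hr
    have hrlen : r < nums.length := by omega
    rw [show List.range (r + 1) = List.range r ++ [r] from List.range_succ,
      List.foldl_append, List.foldl_cons, List.foldl_nil, ih (by omega)]
    have hget : PySem.List.pyGet? nums (↑r) = some nums[r] := by
      rw [PySem.List.pyGet?_natCast, List.getElem?_eq_getElem hrlen]
    have hgd : nums.getD r 0 = nums[r] := List.getD_eq_getElem _ _ hrlen
    unfold pvAltPass2
    rw [hget]
    have htr : (if nums[r] < 0 then ((↑(pvT nums r) : Int)) + 1 else (↑(pvT nums r) : Int))
        = ↑(pvT nums (r + 1)) := by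
      rw [pvT_succ, hgd]
      by_cases hneg : nums[r] < 0 <;> simp [hneg]
    simp only [htr]
    have hP : ∀ i : Nat, i ≤ m →
        PySem.List.pyGetD ((List.range (m + 1)).map (pvPref nums)) (↑i) 0
          = pvPref nums i := by
      intro i hi
      rw [PySem.List.pyGetD_natCast, pvGetD_map_range _ _ _ (by omega)]
    have hleft : (if (↑(pvT nums (r + 1)) : Int) ≤ ↑K then 0
          else PySem.List.pyGetD ((pvNegIdx nums m).map (fun j : Nat => (j : Int)))
            ((↑(pvT nums (r + 1)) : Int) - ↑K - 1) 0 + 1)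
        = (↑(pvL nums K (r + 1)) : Int) := by
      unfold pvL
      by_cases h : pvT nums (r + 1) ≤ K
      · rw [if_pos (by exact_mod_cast h), if_pos h]
        simp
      · rw [if_neg (by exact_mod_cast h), if_neg h]
        have hidx : ((↑(pvT nums (r + 1)) : Int) - ↑K - 1)
            = ↑(pvT nums (r + 1) - K - 1) := by omega
        have hi1 : pvT nums (r + 1) - K - 1 < pvT nums (r + 1) := by omega
        have hi2 : pvT nums (r + 1) - K - 1 < (pvNegIdx nums m).length :=
          lt_of_lt_of_le hi1 (pvT_mono nums (by omega : r + 1 ≤ m))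
        rw [hidx, PySem.List.pyGetD_natCast, pvGetD_map_intCast _ _ hi2,
          pvNegIdx_prefix_getD nums (by omega : r + 1 ≤ m) hi1]
        push_cast
        ring
    rw [hleft]
    have hcast : ((↑r : Int) + 1) = ↑(r + 1) := by push_cast; ring
    rw [hcast, hP (r + 1) (by omega),
      hP (pvL nums K (r + 1)) (le_trans (pvL_le nums K (r + 1)) (by omega))]
    rw [pvBest_succ]
    have hmax : (if pvPref nums (r + 1) - pvPref nums (pvL nums K (r + 1)) > pvBest nums K r
          then pvPref nums (r + 1) - pvPref nums (pvL nums K (r + 1))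
          else pvBest nums K r)
        = max (pvBest nums K r)
            (pvPref nums (r + 1) - pvPref nums (pvL nums K (r + 1))) := by
      rw [max_def]
      split_ifs <;> omega
    rw [hmax]

-- ===== VERDICT (by name: the statement is the Claim_ definition above) =====
theorem max_sum_with_limited_negatives_spec : Claim_equal_max_sum_with_limited_negatives := by
  intro n k numbers _ hpre
  obtain ⟨hlen, hk⟩ := hpre
  unfold Spec_max_sum_with_limited_negatives
  unfold max_sum_with_limited_negatives max_sum_with_limited_negatives_alt
  by_cases hn : n ≤ 0
  · have hempty : PySem.List.pyRange 0 n 1 = [] := by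
      rw [PySem.List.pyRange_one]
      have : (n - 0).toNat = 0 := by omega
      rw [this]
      rfl
    rw [hempty]
    rfl
  · have hk' : 0 ≤ k := by
      rcases hk with h | h
      · omega
      · exact h
    obtain ⟨K, rfl⟩ : ∃ K : Nat, k = ↑K := ⟨k.toNat, by omega⟩
    obtain ⟨m, rfl⟩ : ∃ m : Nat, n = ↑m := ⟨n.toNat, by omega⟩
    have hmlen : m ≤ numbers.length := by
      have := hlen
      omega
    have hrange : PySem.List.pyRange 0 (↑m) 1 = (List.range m).map (fun j : Nat => (j : Int)) := by
      rw [PySem.List.pyRange_one]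
      simp
    rw [hrange]
    simp only [List.foldl_map]
    rw [pvA_invariant numbers K m hmlen, pvB_pass1 numbers m hmlen,
      pvB_pass2 numbers K m hmlen m (le_refl m)]
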